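-- pv_equiv track=rewrite | github.com/GTK-teaching/fm-index | bwt.py | CalculateFirstOcc
-- ===== SOURCE A (Python) =====
-- def CalculateFirstOcc(s):
--     """ count the letters in input string for calculating the
--         first occurance of the letter in left column of the sorted
--         suffix matrix """
--     # s - is the bwt transformed string
--     A = {} # letter count
--     for i, c in enumerate(s):
--         if A.get(c):
--             A[c] += 1
--         else:
--             A[c] = 1
--
--     # sort the letters
--     letters = sorted(A.keys())
--
--     occ = {} # first index of letter
--
--     idx = 0
--     for c in letters:
--         occ[c] = idx
--         idx += A[c]
--     del idx, A
--
--     return occ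
-- ===== SOURCE B (Python) =====
-- def CalculateFirstOcc(s):
--     """Sort the whole string once and record the index at which each
--     letter is first seen; that index is exactly its first-occurrence
--     offset in the sorted left column (no count table, no prefix sums)."""
--     occ = {}
--     i = 0
--     for c in sorted(s):
--         if c not in occ:
--             occ[c] = i
--         i += 1
--     return occ
-- ===== Notes on version B (the rewrite author's own statement) =====
-- stated objective: simpler
-- what changed: A builds a letter-count dict, sorts the distinct letters and accumulates prefix sums of counts; B sorts the whole string once and records the index at which each letter is first seen, needing no count table or accumulator.
import Mathlib
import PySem

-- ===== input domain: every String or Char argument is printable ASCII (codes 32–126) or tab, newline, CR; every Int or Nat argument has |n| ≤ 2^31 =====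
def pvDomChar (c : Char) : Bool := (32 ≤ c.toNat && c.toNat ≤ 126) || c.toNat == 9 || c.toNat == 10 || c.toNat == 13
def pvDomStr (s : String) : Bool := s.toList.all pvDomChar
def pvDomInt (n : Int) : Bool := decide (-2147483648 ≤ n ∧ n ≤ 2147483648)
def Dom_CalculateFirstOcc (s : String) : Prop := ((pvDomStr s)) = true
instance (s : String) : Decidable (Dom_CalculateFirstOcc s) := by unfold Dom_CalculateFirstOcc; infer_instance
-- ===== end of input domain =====

-- B replaces A's count-then-prefix-sum passes by a single first-seen scan of the fully
-- sorted string (objective: simpler); equality of the returned dict is proved below.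

-- iterating a Python string yields its characters as 1-character strings
def pyIterStr (s : String) : List String := s.toList.map (fun c => String.ofList [c])

-- ===== PORT A =====
def CalculateFirstOcc (s : String) : List (String × Int) :=
  -- A = {}; for i, c in enumerate(s): if A.get(c): A[c] += 1 else: A[c] = 1
  -- (A.get(c) is truthy iff c is a key with nonzero value: modelled as getD c 0 ≠ 0)
  let A := (PySem.List.enumerate (pyIterStr s)).foldl
      (fun (d : PySem.Dict String Int) p =>
        if d.getD p.2 0 ≠ 0 then d.insert p.2 (d.getD p.2 0 + 1) else d.insert p.2 1)
      PySem.Dict.empty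
  -- letters = sorted(A.keys())
  let letters := PySem.List.sorted A.keys (fun x => x)
  -- occ = {}; idx = 0; for c in letters: occ[c] = idx; idx += A[c]
  -- (c is a key of A inside the loop, so A[c] is exactly A.getD c 0)
  let st := letters.foldl
      (fun (st : PySem.Dict String Int × Int) c => (st.1.insert c st.2, st.2 + A.getD c 0))
      (PySem.Dict.empty, 0)
  st.1.items

-- ===== PORT B =====
def CalculateFirstOcc_alt (s : String) : List (String × Int) :=
  -- occ = {}; i = 0; for c in sorted(s): if c not in occ: occ[c] = i; i += 1
  let st := (PySem.List.sorted (pyIterStr s) (fun x => x)).foldl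
      (fun (st : PySem.Dict String Int × Int) c =>
        ((if st.1.contains c then st.1 else st.1.insert c st.2), st.2 + 1))
      (PySem.Dict.empty, 0)
  st.1.items

-- ===== PRECONDITION & SPEC =====
def Spec_CalculateFirstOcc (s : String) (out : List (String × Int)) : Prop := out = CalculateFirstOcc_alt s
instance (s : String) (out : List (String × Int)) : Decidable (Spec_CalculateFirstOcc s out) := by unfold Spec_CalculateFirstOcc; infer_instance

-- ===== CLAIM (what is proved, stated in full; the proofs are below) =====
def Claim_equal_CalculateFirstOcc : Prop := ∀ (s : String), Dom_CalculateFirstOcc s → Spec_CalculateFirstOcc s (CalculateFirstOcc s)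

-- ===== LEMMAS AND PROOFS =====

-- A's occ-dict as a list: offsets drawn from the counts of xs, keys from L
def pvOffsets (xs : List String) : List String → Int → List (String × Int)
  | [], _ => []
  | c :: L, i => (c, i) :: pvOffsets xs L (i + (xs.count c : Int))

-- B's occ-dict as a list: first-seen indices along a (sorted) list, run by run
def pvRuns : List String → Int → List (String × Int)
  | [], _ => []
  | c :: r, i =>
      (c, i) :: pvRuns (r.dropWhile (· == c)) (i + 1 + ((r.takeWhile (· == c)).length : Int))
termination_by l _ => l.length
decreasing_by
  simpa using Nat.lt_succ_of_le (List.length_dropWhile_le _ _)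

lemma pvRuns_nil (i : Int) : pvRuns [] i = [] := by simp [pvRuns]

lemma pvRuns_cons (c : String) (r : List String) (i : Int) :
    pvRuns (c :: r) i
      = (c, i) :: pvRuns (r.dropWhile (· == c)) (i + 1 + ((r.takeWhile (· == c)).length : Int)) := by
  simp [pvRuns]

lemma pv_countloop_enumerate :
    ∀ (l : List String) (n : Int) (d : PySem.Dict String Int),
      (PySem.List.enumerate l n).foldl (fun d p => d.insert p.2 (d.getD p.2 0 + 1)) d
        = l.foldl (fun d c => d.insert c (d.getD c 0 + 1)) d := by
  intro l
  induction l with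
  | nil => intro n d; rfl
  | cons a t ih => intro n d; simp only [PySem.List.enumerate_cons, List.foldl_cons]; exact ih _ _

lemma pv_count_step :
    (fun (d : PySem.Dict String Int) (p : Int × String) =>
        if d.getD p.2 0 ≠ 0 then d.insert p.2 (d.getD p.2 0 + 1) else d.insert p.2 1)
      = fun d p => d.insert p.2 (d.getD p.2 0 + 1) := by
  funext d p
  by_cases h : d.getD p.2 0 = 0
  · simp [h]
  · simp [h]

lemma pv_foldA (xs : List String) :
    ∀ (L : List String) (occ : PySem.Dict String Int) (i : Int),
      L.Nodup → (∀ c ∈ L, occ.contains c = false) →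
      (L.foldl (fun st c => (st.1.insert c st.2, st.2 + (xs.count c : Int))) (occ, i)).1.items
        = occ.items ++ pvOffsets xs L i := by
  intro L
  induction L with
  | nil => intro occ i _ _; simp [pvOffsets]
  | cons c L ih =>
      intro occ i hnd hfresh
      simp only [List.foldl_cons]
      rw [ih (occ.insert c i) _ hnd.of_cons]
      · rw [PySem.Dict.items_insert_of_not_contains occ i (hfresh c (by simp))]
        simp [pvOffsets]
      · intro x hx
        rw [PySem.Dict.contains_insert]
        have hxc : x ≠ c := fun h => (List.nodup_cons.mp hnd).1 (h ▸ hx)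
        simp [hxc, hfresh x (List.mem_cons_of_mem _ hx)]

lemma pv_foldB_skip :
    ∀ (k : List String) (occ : PySem.Dict String Int) (i : Int),
      (∀ x ∈ k, occ.contains x = true) →
      k.foldl
        (fun (st : PySem.Dict String Int × Int) c =>
          ((if st.1.contains c then st.1 else st.1.insert c st.2), st.2 + 1)) (occ, i)
        = (occ, i + (k.length : Int)) := by
  intro k
  induction k with
  | nil => intro occ i _; simp
  | cons x t ih =>
      intro occ i h
      rw [List.foldl_cons]
      have h1 : (if occ.contains x = true then occ else occ.insert x i) = occ := by
        rw [h x (by simp)]; simp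
      rw [h1, ih occ (i + 1) (fun y hy => h y (List.mem_cons_of_mem _ hy))]
      have h2 : i + 1 + (t.length : Int) = i + ((t.length + 1 : Nat) : Int) := by push_cast; ring
      rw [List.length_cons, h2]

lemma pv_dropWhile_ne (c : String) :
    ∀ (l : List String), l.Pairwise (· ≤ ·) → (∀ x ∈ l, c ≤ x) →
      ∀ x ∈ l.dropWhile (· == c), x ≠ c := by
  intro l
  induction l with
  | nil => intro _ _ x hx; simp at hx
  | cons a l' ih =>
      intro hp hle x hx
      by_cases hac : a = c
      · rw [List.dropWhile_cons_of_pos (by simp [hac])] at hx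
        exact ih (hp.of_cons) (fun y hy => hac ▸ List.rel_of_pairwise_cons hp hy) x hx
      · rw [List.dropWhile_cons_of_neg (by simp [hac])] at hx
        have hca : c < a := lt_of_le_of_ne (hle a (by simp)) (Ne.symm hac)
        rcases List.mem_cons.mp hx with h | h
        · exact h ▸ ne_of_gt hca
        · exact ne_of_gt (lt_of_lt_of_le hca (List.rel_of_pairwise_cons hp h))

lemma pv_foldB :
    ∀ (n : Nat) (t : List String), t.length ≤ n → t.Pairwise (· ≤ ·) →
      ∀ (occ : PySem.Dict String Int) (i : Int),
        (∀ x ∈ t, occ.contains x = false) →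
        (t.foldl
          (fun (st : PySem.Dict String Int × Int) c =>
            ((if st.1.contains c then st.1 else st.1.insert c st.2), st.2 + 1)) (occ, i)).1.items
          = occ.items ++ pvRuns t i := by
  intro n
  induction n with
  | zero =>
      intro t ht _ occ i _
      rw [List.length_eq_zero_iff.mp (Nat.le_zero.mp ht)]
      simp [pvRuns_nil]
  | succ n ih =>
      intro t ht hp occ i hfresh
      match t with
      | [] => simp [pvRuns_nil]
      | c :: r =>
        have hcle : ∀ x ∈ r, c ≤ x := fun x hx => List.rel_of_pairwise_cons hp hx
        have hrp : r.Pairwise (· ≤ ·) := hp.of_cons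
        have hne : ∀ x ∈ r.dropWhile (· == c), x ≠ c := pv_dropWhile_ne c r hrp hcle
        have hkc : ∀ x ∈ r.takeWhile (· == c), x = c := by
          intro x hx
          have h := List.mem_takeWhile_imp hx
          simpa using h
        rw [List.foldl_cons]
        have h1 : (if occ.contains c = true then occ else occ.insert c i) = occ.insert c i := by
          rw [hfresh c (by simp)]; simp
        rw [h1]
        have hfold : ∀ (st : PySem.Dict String Int × Int),
            r.foldl (fun st c' => ((if st.1.contains c' then st.1 else st.1.insert c' st.2), st.2 + 1)) st
              = (r.dropWhile (· == c)).foldl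
                  (fun st c' => ((if st.1.contains c' then st.1 else st.1.insert c' st.2), st.2 + 1))
                  ((r.takeWhile (· == c)).foldl
                    (fun st c' => ((if st.1.contains c' then st.1 else st.1.insert c' st.2), st.2 + 1)) st) := by
          intro st
          conv_lhs => rw [← List.takeWhile_append_dropWhile (p := (· == c)) (l := r)]
          rw [List.foldl_append]
        rw [hfold]
        rw [pv_foldB_skip _ (occ.insert c i) (i + 1)
          (fun x hx => by
            rw [hkc x hx, PySem.Dict.contains_insert]; simp)]
        rw [ih (r.dropWhile (· == c))
          (le_trans (List.length_dropWhile_le _ _) (Nat.lt_succ_iff.mp (lt_of_lt_of_le (by simp) ht)))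
          (List.Pairwise.sublist (List.dropWhile_sublist _) hrp)
          (occ.insert c i) _
          (fun x hx => by
            rw [PySem.Dict.contains_insert]
            simp [hne x hx, hfresh x (List.mem_cons_of_mem _ ((List.dropWhile_sublist (· == c)).mem hx))])]
        rw [PySem.Dict.items_insert_of_not_contains occ i (hfresh c (by simp))]
        rw [pvRuns_cons]
        simp

lemma pv_offsets_congr (xs ys : List String) :
    ∀ (L : List String) (i : Int), (∀ x ∈ L, xs.count x = ys.count x) →
      pvOffsets xs L i = pvOffsets ys L i := by
  intro L
  induction L with
  | nil => intro i _; rfl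
  | cons c L ih =>
      intro i h
      simp only [pvOffsets, h c (by simp)]
      rw [ih _ (fun x hx => h x (List.mem_cons_of_mem _ hx))]

lemma pv_runs_eq_offsets :
    ∀ (n : Nat) (t : List String), t.length ≤ n → t.Pairwise (· ≤ ·) →
      ∀ (i : Int),
        pvOffsets t (PySem.List.sorted (PySem.Set.ofList t) (fun x => x)) i = pvRuns t i := by
  intro n
  induction n with
  | zero =>
      intro t ht _ i
      rw [List.length_eq_zero_iff.mp (Nat.le_zero.mp ht)]
      rw [pvRuns_nil]
      rfl
  | succ n ih =>
      intro t ht hp i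
      match t with
      | [] => rw [pvRuns_nil]; rfl
      | c :: r =>
        have hcle : ∀ x ∈ r, c ≤ x := fun x hx => List.rel_of_pairwise_cons hp hx
        have hrp : r.Pairwise (· ≤ ·) := hp.of_cons
        have hkr : r.takeWhile (· == c) ++ r.dropWhile (· == c) = r := List.takeWhile_append_dropWhile
        have hkc : ∀ x ∈ r.takeWhile (· == c), x = c := by
          intro x hx
          have h := List.mem_takeWhile_imp hx
          simpa using h
        have hne : ∀ x ∈ r.dropWhile (· == c), x ≠ c := pv_dropWhile_ne c r hrp hcle
        have hrestmem : ∀ x ∈ r.dropWhile (· == c), x ∈ r :=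
          fun x hx => (List.dropWhile_sublist (· == c)).mem hx
        -- the sorted distinct letters of t are c followed by those of the tail past c's run
        have hsort : PySem.List.sorted (PySem.Set.ofList (c :: r)) (fun x => x)
            = c :: PySem.List.sorted (PySem.Set.ofList (r.dropWhile (· == c))) (fun x => x) := by
          apply PySem.List.sorted_eq_of_perm_of_pairwise_lt
          · apply (List.perm_ext_iff_of_nodup _ (PySem.Set.nodup_ofList _)).mpr
            · intro x
              simp only [List.mem_cons, PySem.List.mem_sorted, PySem.Set.mem_ofList]
              constructor
              · rintro (rfl | hx)
                · exact .inl rfl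
                · exact .inr (by rw [← hkr]; exact List.mem_append_right _ hx)
              · rintro (rfl | hx)
                · exact .inl rfl
                · rw [← hkr] at hx
                  rcases List.mem_append.mp hx with h | h
                  · exact .inl (hkc x h)
                  · exact .inr h
            · apply List.nodup_cons.mpr
              refine ⟨fun hc => ?_, ?_⟩
              · exact hne c (by simpa [PySem.List.mem_sorted, PySem.Set.mem_ofList] using hc) rfl
              · exact ((PySem.List.sorted_perm _ _ _).nodup_iff).mpr (PySem.Set.nodup_ofList _)
          · apply List.pairwise_cons.mpr
            refine ⟨fun y hy => ?_, ?_⟩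
            · have hyr : y ∈ r.dropWhile (· == c) := by
                simpa [PySem.List.mem_sorted, PySem.Set.mem_ofList] using hy
              exact lt_of_le_of_ne (hcle y (hrestmem y hyr)) (Ne.symm (hne y hyr))
            · exact PySem.List.sorted_ofList_pairwise_lt _
        rw [hsort]
        have hrc : r.count c = (r.takeWhile (· == c)).length := by
          conv_lhs => rw [← hkr]
          rw [List.count_append]
          rw [List.count_eq_length.mpr (fun b hb => (hkc b hb).symm)]
          rw [List.count_eq_zero.mpr (fun hc => hne c hc rfl)]
          omega
        have hcount : (c :: r).count c = 1 + (r.takeWhile (· == c)).length := by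
          rw [List.count_cons_self, hrc]
          omega
        simp only [pvOffsets]
        rw [pv_offsets_congr (c :: r) (r.dropWhile (· == c)) _ _
          (fun x hx => by
            have hxrest : x ∈ r.dropWhile (· == c) := by
              simpa [PySem.List.mem_sorted, PySem.Set.mem_ofList] using hx
            have hxc : x ≠ c := hne x hxrest
            have hdrop : r.count x = (r.dropWhile (· == c)).count x := by
              conv_lhs => rw [← hkr]
              rw [List.count_append, List.count_eq_zero.mpr (fun hc => hxc (hkc x hc))]
              omega
            rw [List.count_cons_of_ne (Ne.symm hxc), hdrop])]
        rw [ih (r.dropWhile (· == c))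
          (le_trans (List.length_dropWhile_le _ _) (Nat.lt_succ_iff.mp (lt_of_lt_of_le (by simp) ht)))
          (List.Pairwise.sublist (List.dropWhile_sublist _) hrp)]
        have hidx : i + (((c :: r).count c : Nat) : Int)
            = i + 1 + (((r.takeWhile (· == c)).length : Nat) : Int) := by
          rw [hcount]; push_cast; ring
        rw [hidx, pvRuns_cons]

-- ===== VERDICT (by name: the statement is the Claim_ definition above) =====
theorem CalculateFirstOcc_spec : Claim_equal_CalculateFirstOcc := by
  intro s _
  unfold Spec_CalculateFirstOcc CalculateFirstOcc CalculateFirstOcc_alt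
  dsimp only
  set cs := pyIterStr s with hcs
  set t := PySem.List.sorted cs (fun x => x) with htdef
  have htperm : t.Perm cs := PySem.List.sorted_perm _ _ _
  have htp : t.Pairwise (· ≤ ·) := PySem.List.sorted_pairwise cs (fun x => x)
  -- A's count dict is Counter(cs)
  rw [pv_count_step, pv_countloop_enumerate cs 0 PySem.Dict.empty,
    PySem.Dict.foldl_insert_getD_add_one_eq_counter]
  -- A's second loop adds counts: rewrite the lookup to List.count
  have hstep : (fun (st : PySem.Dict String Int × Int) c =>
        (st.1.insert c st.2, st.2 + (PySem.Dict.counter cs).getD c 0))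
      = fun st c => (st.1.insert c st.2, st.2 + (cs.count c : Int)) := by
    funext st c; rw [PySem.Dict.getD_counter]
  rw [hstep, PySem.Dict.keys_counter]
  have hletters : PySem.List.sorted (PySem.Set.ofList cs) (fun x => x)
      = PySem.List.sorted (PySem.Set.ofList t) (fun x => x) := by
    apply PySem.List.sorted_eq_sorted_of_perm _ _ _ (fun a b h => h)
    apply (List.perm_ext_iff_of_nodup (PySem.Set.nodup_ofList _) (PySem.Set.nodup_ofList _)).mpr
    intro x
    simp [PySem.Set.mem_ofList, htperm.mem_iff]
  have hnodup : (PySem.List.sorted (PySem.Set.ofList cs) (fun x => x)).Nodup :=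
    ((PySem.List.sorted_perm _ _ _).nodup_iff).mpr (PySem.Set.nodup_ofList _)
  rw [pv_foldA cs _ PySem.Dict.empty 0 hnodup (fun c _ => PySem.Dict.contains_empty c)]
  rw [pv_foldB (t.length) t le_rfl htp PySem.Dict.empty 0 (fun x _ => PySem.Dict.contains_empty x)]
  rw [pv_offsets_congr cs t _ 0 (fun x _ => (htperm.count_eq x).symm), hletters]
  rw [pv_runs_eq_offsets t.length t le_rfl htp 0]
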